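-- pv_equiv track=rewrite | github.com/magicwyzh/icais-dl | python/icdl/pytorch_serialize_utils.py | pytorch_tensor_name_to_icdl_tensor_name
-- ===== SOURCE A (Python) =====
-- def pytorch_tensor_name_to_icdl_tensor_name(name):
--     '''
--         @param name: name string from model.state_dict().keys()
--     '''
--     parts = name.split(".")
--     s = ""
--     for i in range(len(parts) - 1):
--         s += parts[i]
--         s += "->"
--     s = s[:-2] + "." + parts[-1]
--     return s
-- ===== SOURCE B (Python) =====
-- def pytorch_tensor_name_to_icdl_tensor_name(name):
--     '''
--         @param name: name string from model.state_dict().keys()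
--     '''
--     head, _, last = name.rpartition('.')
--     return head.replace('.', '->') + '.' + last
-- ===== Notes on version B (the rewrite author's own statement) =====
-- stated objective: idiomatic
-- what changed: A splits the name into a parts list, concatenates every part plus an arrow in an index loop and slices the trailing arrow off before re-attaching the last part; B maintains no parts list and no loop: it rpartitions the name at its final dot and turns the remaining dots of the prefix into arrows with one str.replace.
import Mathlib
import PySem

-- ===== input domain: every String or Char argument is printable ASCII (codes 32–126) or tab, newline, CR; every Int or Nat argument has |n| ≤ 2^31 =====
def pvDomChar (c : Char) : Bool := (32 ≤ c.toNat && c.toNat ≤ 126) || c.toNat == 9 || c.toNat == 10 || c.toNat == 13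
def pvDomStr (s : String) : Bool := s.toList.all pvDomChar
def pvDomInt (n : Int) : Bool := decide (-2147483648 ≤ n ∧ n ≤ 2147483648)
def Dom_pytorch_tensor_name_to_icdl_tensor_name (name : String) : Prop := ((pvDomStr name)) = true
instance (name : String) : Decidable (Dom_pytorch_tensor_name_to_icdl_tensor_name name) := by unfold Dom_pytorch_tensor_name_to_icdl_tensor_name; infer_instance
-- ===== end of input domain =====

-- B changes the decomposition (objective: idiomatic, same cost class): A builds a parts list and
-- joins it with arrows in an index loop, slicing the trailing arrow off; B keeps no list and no
-- loop: it rpartitions at the final dot and arrow-izes the prefix with one replace.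

-- ===== PORT A =====
def pytorch_tensor_name_to_icdl_tensor_name (name : String) : String :=
  -- parts = name.split(".")
  let parts := PySem.Chars.splitOn name.toList ['.']
  -- s = ""; for i in range(len(parts) - 1): s += parts[i]; s += "->"
  let s : List Char :=
    (PySem.List.pyRange 0 ((parts.length : Int) - 1)).foldl
      (fun s i => (s ++ PySem.List.pyGetD parts i []) ++ ['-', '>']) []
  -- s = s[:-2] + "." + parts[-1]
  let s := (PySem.List.slice s none (some (-2)) ++ ['.']) ++ PySem.List.pyGetD parts (-1) []
  String.ofList s

-- ===== PORT B =====
-- head, _, last = name.rpartition('.'); rpartition is not a PySem primitive, so it is ported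
-- step for step: the last occurrence via Chars.rfind (exact: str.rfind), then the two slices
-- around it; rfind = -1 (no dot) gives head = '' and last = name, exactly as rpartition does.
def pytorch_tensor_name_to_icdl_tensor_name_alt (name : String) : String :=
  let s := name.toList
  let i := PySem.Chars.rfind s ['.']
  let head := if i = -1 then [] else s.take i.toNat
  let last := if i = -1 then s else s.drop (i.toNat + 1)
  -- return head.replace('.', '->') + '.' + last
  String.ofList ((PySem.Chars.replace head ['.'] ['-', '>'] ++ ['.']) ++ last)

-- ===== PRECONDITION & SPEC =====
def Spec_pytorch_tensor_name_to_icdl_tensor_name (name : String) (out : String) : Prop := out = pytorch_tensor_name_to_icdl_tensor_name_alt name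
instance (name : String) (out : String) : Decidable (Spec_pytorch_tensor_name_to_icdl_tensor_name name out) := by unfold Spec_pytorch_tensor_name_to_icdl_tensor_name; infer_instance

-- ===== CLAIM (what is proved, stated in full; the proofs are below) =====
def Claim_equal_pytorch_tensor_name_to_icdl_tensor_name : Prop := ∀ (name : String), Dom_pytorch_tensor_name_to_icdl_tensor_name name → Spec_pytorch_tensor_name_to_icdl_tensor_name name (pytorch_tensor_name_to_icdl_tensor_name name)

-- ===== LEMMAS AND PROOFS =====

-- Reference decomposition both ports are reduced to: split at every dot.
def pvSplitDot : List Char → List (List Char)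
  | [] => [[]]
  | c :: t =>
    if c = '.' then [] :: pvSplitDot t
    else match pvSplitDot t with
      | [] => [[c]]
      | p :: ps => (c :: p) :: ps

def pvConsFst (x : List Char) : List (List Char) → List (List Char)
  | [] => [x]
  | p :: ps => (x ++ p) :: ps

theorem pvSplitDot_ne_nil (s : List Char) : pvSplitDot s ≠ [] := by
  induction s with
  | nil => simp [pvSplitDot]
  | cons c t ih =>
    simp only [pvSplitDot]
    split
    · simp
    · split <;> simp

theorem pv_go (fuel : Nat) (s cur : List Char) (acc : List (List Char))
    (h : s.length ≤ fuel) :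
    PySem.Chars.splitOn.go ['.'] fuel s cur acc
      = acc.reverse ++ pvConsFst cur.reverse (pvSplitDot s) := by
  induction fuel generalizing s cur acc with
  | zero =>
    have : s = [] := by simpa using h
    subst this
    simp [PySem.Chars.splitOn.go, pvSplitDot, pvConsFst]
  | succ fuel ih =>
    cases s with
    | nil => simp [PySem.Chars.splitOn.go, pvSplitDot, pvConsFst]
    | cons c rest =>
      have hr : rest.length ≤ fuel := by simpa using h
      rw [PySem.Chars.splitOn.go]
      by_cases hc : c = '.'
      · subst hc
        simp only [List.isPrefixOf, BEq.rfl, Bool.true_and, if_pos]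
        simp only [List.length_cons, List.length_nil, List.drop_succ_cons, List.drop_zero]
        rw [ih _ _ _ hr]
        obtain ⟨p, ps, hps⟩ : ∃ p ps, pvSplitDot rest = p :: ps := by
          cases hx : pvSplitDot rest with
          | nil => exact absurd hx (pvSplitDot_ne_nil rest)
          | cons p ps => exact ⟨p, ps, rfl⟩
        simp [pvSplitDot, pvConsFst, hps]
      · rw [show (['.'].isPrefixOf (c :: rest)) = false by
          simp [List.isPrefixOf]; exact fun hh => hc hh.symm]
        simp only [Bool.false_eq_true, ite_false]
        rw [ih _ _ _ hr]
        obtain ⟨p, ps, hps⟩ : ∃ p ps, pvSplitDot rest = p :: ps := by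
          cases hx : pvSplitDot rest with
          | nil => exact absurd hx (pvSplitDot_ne_nil rest)
          | cons p ps => exact ⟨p, ps, rfl⟩
        simp [pvSplitDot, pvConsFst, hps, hc]

theorem pv_splitOn_eq (s : List Char) : PySem.Chars.splitOn s ['.'] = pvSplitDot s := by
  rw [PySem.Chars.splitOn, pv_go _ _ _ _ (by omega)]
  obtain ⟨p, ps, hps⟩ : ∃ p ps, pvSplitDot s = p :: ps := by
    cases hx : pvSplitDot s with
    | nil => exact absurd hx (pvSplitDot_ne_nil s)
    | cons p ps => exact ⟨p, ps, rfl⟩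
  simp [pvConsFst, hps]

theorem pvSplitDot_no_dot {s : List Char} (h : ('.' : Char) ∉ s) : pvSplitDot s = [s] := by
  induction s with
  | nil => simp [pvSplitDot]
  | cons c t ih =>
    have hc : c ≠ '.' := fun he => h (he ▸ List.mem_cons_self)
    have ht := ih (fun hm => h (List.mem_cons_of_mem _ hm))
    simp [pvSplitDot, hc, ht]

def pvJoinArrow : List (List Char) → List Char
  | [] => []
  | [p] => p
  | p :: q :: r => (p ++ ['-', '>']) ++ pvJoinArrow (q :: r)

theorem pv_flatten_arrow (ps : List (List Char)) :
    (ps.map (· ++ ['-', '>'])).flatten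
      = pvJoinArrow ps ++ (if ps.isEmpty then [] else ['-', '>']) := by
  induction ps with
  | nil => simp [pvJoinArrow]
  | cons p ps ih =>
    cases ps with
    | nil => simp [pvJoinArrow]
    | cons q r =>
      simp only [List.isEmpty_cons, Bool.false_eq_true, ite_false] at ih
      simp only [List.map_cons, List.flatten_cons] at ih ⊢
      rw [ih, pvJoinArrow]
      simp

theorem pv_getD_neg_one (p : List Char) (ps : List (List Char)) :
    PySem.List.pyGetD (p :: ps) (-1) [] = (p :: ps).getLastD [] := by
  simp [PySem.List.pyGetD, PySem.List.pyGet?, PySem.List.pyIdx?]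
  rw [List.getLast?_eq_getElem?]
  simp

theorem pv_map_range_getD (parts : List (List Char)) :
    (List.range (parts.length - 1)).map (fun k => parts.getD k []) = parts.dropLast := by
  apply List.ext_getElem
  · simp
  · intro i h1 h2
    simp only [List.getElem_map, List.getElem_range, List.getElem_dropLast]
    rw [List.getD_eq_getElem]

def pvSpec (cs : List Char) : List Char :=
  (pvJoinArrow (pvSplitDot cs).dropLast ++ ['.']) ++ (pvSplitDot cs).getLastD []

theorem pv_A_eq (name : String) :
    pytorch_tensor_name_to_icdl_tensor_name name = String.ofList (pvSpec name.toList) := by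
  unfold pytorch_tensor_name_to_icdl_tensor_name
  dsimp only
  rw [pv_splitOn_eq]
  obtain ⟨p, ps, hps⟩ : ∃ p ps, pvSplitDot name.toList = p :: ps := by
    cases hx : pvSplitDot name.toList with
    | nil => exact absurd hx (pvSplitDot_ne_nil _)
    | cons p ps => exact ⟨p, ps, rfl⟩
  rw [hps, pvSpec, hps]
  congr 1
  have hlen : ((p :: ps).length : Int) - 1 = (ps.length : Int) := by
    simp only [List.length_cons]; push_cast; ring
  rw [hlen, PySem.List.pyRange_zero_natCast]
  simp only [List.append_assoc]
  rw [PySem.List.foldl_append_eq_flatMap]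
  rw [List.flatMap_map]
  simp only [PySem.List.pyGetD_natCast]
  rw [List.flatMap_def]
  have hmm : List.map (fun k => (p :: ps).getD k [] ++ ['-', '>']) (List.range ps.length)
      = ((p :: ps).dropLast).map (· ++ ['-', '>']) := by
    rw [show ps.length = (p :: ps).length - 1 by simp, ← pv_map_range_getD, List.map_map]
    simp [Function.comp_def]
  rw [hmm, pv_flatten_arrow, pv_getD_neg_one]
  rw [PySem.List.slice_to_neg_ofNat _ 2 (by omega)]
  cases ps with
  | nil => simp [pvJoinArrow]
  | cons q r =>
    have hdl : ((p :: q :: r).dropLast).isEmpty = false := by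
      simp [List.dropLast]
    rw [hdl]
    simp only [Bool.false_eq_true, ite_false, List.nil_append]
    rw [show (pvJoinArrow ((p :: q :: r).dropLast) ++ ['-', '>']).length - 2
        = (pvJoinArrow ((p :: q :: r).dropLast)).length by simp]
    rw [List.take_left]

-- B side: what replace('.', '->') computes, character by character.
def pvRepl : List Char → List Char
  | [] => []
  | c :: t => if c = '.' then '-' :: '>' :: pvRepl t else c :: pvRepl t

theorem pv_replace_go (fuel : Nat) (l acc : List Char) (h : l.length ≤ fuel) :
    PySem.Chars.replace.go ['.'] ['-', '>'] fuel l acc = acc.reverse ++ pvRepl l := by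
  induction fuel generalizing l acc with
  | zero =>
    have : l = [] := by simpa using h
    subst this
    simp [PySem.Chars.replace.go, pvRepl]
  | succ fuel ih =>
    cases l with
    | nil => simp [PySem.Chars.replace.go, pvRepl]
    | cons c t =>
      have hr : t.length ≤ fuel := by simpa using h
      rw [PySem.Chars.replace.go]
      by_cases hc : c = '.'
      · subst hc
        simp only [List.isPrefixOf, BEq.rfl, Bool.true_and, if_pos]
        simp only [List.length_cons, List.length_nil, List.drop_succ_cons, List.drop_zero]
        rw [ih _ _ hr]
        simp [pvRepl]
      · rw [show (['.'].isPrefixOf (c :: t)) = false by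
          simp [List.isPrefixOf]; exact fun hh => hc hh.symm]
        simp only [Bool.false_eq_true, ite_false]
        rw [ih _ _ hr]
        simp [pvRepl, hc]

theorem pv_replace_eq (l : List Char) :
    PySem.Chars.replace l ['.'] ['-', '>'] = pvRepl l := by
  rw [PySem.Chars.replace]
  simp only [List.isEmpty_cons, Bool.false_eq_true, ite_false]
  rw [pv_replace_go _ _ _ (by omega)]
  simp

theorem pv_repl_join (l : List Char) : pvRepl l = pvJoinArrow (pvSplitDot l) := by
  induction l with
  | nil => simp [pvRepl, pvSplitDot, pvJoinArrow]
  | cons c t ih =>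
    by_cases hc : c = '.'
    · subst hc
      obtain ⟨p, ps, hps⟩ : ∃ p ps, pvSplitDot t = p :: ps := by
        cases hx : pvSplitDot t with
        | nil => exact absurd hx (pvSplitDot_ne_nil t)
        | cons p ps => exact ⟨p, ps, rfl⟩
      simp [pvRepl, pvSplitDot, hps, pvJoinArrow, ih]
    · simp only [pvRepl, hc, if_false, pvSplitDot]
      obtain ⟨p, ps, hps⟩ : ∃ p ps, pvSplitDot t = p :: ps := by
        cases hx : pvSplitDot t with
        | nil => exact absurd hx (pvSplitDot_ne_nil t)
        | cons p ps => exact ⟨p, ps, rfl⟩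
      rw [hps] at ih ⊢
      cases ps with
      | nil => simp [pvJoinArrow, ih]
      | cons q r => simp [pvJoinArrow, ih]

theorem pvSplitDot_append_last {a b : List Char} (hb : ('.' : Char) ∉ b) :
    pvSplitDot (a ++ '.' :: b) = pvSplitDot a ++ [b] := by
  induction a with
  | nil => simp [pvSplitDot, pvSplitDot_no_dot hb]
  | cons c t ih =>
    by_cases hc : c = '.'
    · subst hc; simp [pvSplitDot, ih]
    · simp only [List.cons_append, pvSplitDot, hc, if_false, ih]
      obtain ⟨p, ps, hps⟩ : ∃ p ps, pvSplitDot t = p :: ps := by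
        cases hx : pvSplitDot t with
        | nil => exact absurd hx (pvSplitDot_ne_nil t)
        | cons p ps => exact ⟨p, ps, rfl⟩
      simp [hps]

-- rfind.go on ['.']: -1 iff no occurrence at any index ≤ j, else the largest such index.
theorem pv_rfind_go_spec (s : List Char) (j : Nat) :
    (PySem.Chars.rfind.go s ['.'] j = -1 ∧ ∀ k, k ≤ j → ¬ ['.'] <+: s.drop k)
    ∨ (∃ m : Nat, m ≤ j ∧ PySem.Chars.rfind.go s ['.'] j = (m : Int) ∧ ['.'] <+: s.drop m
        ∧ ∀ k, m < k → k ≤ j → ¬ ['.'] <+: s.drop k) := by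
  induction j with
  | zero =>
    by_cases h : ['.'].isPrefixOf s
    · exact Or.inr ⟨0, le_refl 0, by simp [PySem.Chars.rfind.go, h],
        by simpa using List.isPrefixOf_iff_prefix.mp h, by omega⟩
    · left
      refine ⟨by simp [PySem.Chars.rfind.go, h], ?_⟩
      intro k hk
      interval_cases k
      simpa using fun hp => h (List.isPrefixOf_iff_prefix.mpr (by simpa using hp))
  | succ j ih =>
    by_cases h : ['.'].isPrefixOf (s.drop (j + 1))
    · refine Or.inr ⟨j + 1, le_refl _, ?_, List.isPrefixOf_iff_prefix.mp h, by omega⟩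
      simp [PySem.Chars.rfind.go, h]
    · have hgo : PySem.Chars.rfind.go s ['.'] (j + 1) = PySem.Chars.rfind.go s ['.'] j := by
        simp [PySem.Chars.rfind.go, h]
      have hnp : ¬ ['.'] <+: s.drop (j + 1) :=
        fun hp => h (List.isPrefixOf_iff_prefix.mpr hp)
      rcases ih with ⟨he, hall⟩ | ⟨m, hm, he, hpre, hmax⟩
      · left
        refine ⟨hgo.trans he, fun k hk => ?_⟩
        rcases Nat.lt_or_ge k (j + 1) with hlt | hge
        · exact hall k (by omega)
        · have : k = j + 1 := by omega
          subst this; exact hnp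
      · right
        refine ⟨m, by omega, hgo.trans he, hpre, fun k hk1 hk2 => ?_⟩
        rcases Nat.lt_or_ge k (j + 1) with hlt | hge
        · exact hmax k hk1 (by omega)
        · have : k = j + 1 := by omega
          subst this; exact hnp

theorem pv_prefix_drop_iff (s : List Char) (k : Nat) :
    ['.'] <+: s.drop k ↔ ∃ t, s.drop k = '.' :: t := by
  constructor
  · rintro ⟨t, ht⟩; exact ⟨t, by simpa using ht.symm⟩
  · rintro ⟨t, ht⟩; exact ⟨t, by simp [ht]⟩

theorem pv_B_eq (name : String) :
    pytorch_tensor_name_to_icdl_tensor_name_alt name = String.ofList (pvSpec name.toList) := by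
  unfold pytorch_tensor_name_to_icdl_tensor_name_alt
  dsimp only
  rw [PySem.Chars.rfind]
  rcases pv_rfind_go_spec name.toList name.toList.length with ⟨he, hall⟩ | ⟨m, hm, he, hpre, hmax⟩
  · -- no dot in the name
    have hnd : ('.' : Char) ∉ name.toList := by
      intro hmem
      obtain ⟨u, v, huv⟩ := List.append_of_mem hmem
      exact hall u.length (by rw [huv]; simp) (by rw [huv]; simp)
    rw [he]
    simp only [reduceIte]
    rw [pv_replace_eq, pvSpec, pvSplitDot_no_dot hnd]
    simp [pvRepl, pvJoinArrow]
  · -- m is the index of the last dot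
    have hml : m < name.toList.length := by
      by_contra hge
      rw [List.drop_eq_nil_iff.mpr (by omega)] at hpre
      simp at hpre
    obtain ⟨t, ht⟩ := (pv_prefix_drop_iff _ m).mp hpre
    have ht1 : name.toList.drop (m + 1) = t := by
      have h2 := congrArg (List.drop 1) ht
      rw [List.drop_drop] at h2
      simpa using h2
    have hsplit : name.toList = name.toList.take m ++ '.' :: name.toList.drop (m + 1) := by
      conv_lhs => rw [← List.take_append_drop m name.toList]
      rw [ht, ht1]
    have hnd2 : ('.' : Char) ∉ name.toList.drop (m + 1) := by
      intro hmem
      obtain ⟨u, v, huv⟩ := List.append_of_mem hmem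
      refine hmax (m + 1 + u.length) (by omega) ?_ ?_
      · have hl := congrArg List.length huv
        simp only [List.length_drop, List.length_append, List.length_cons] at hl
        omega
      · rw [show name.toList.drop (m + 1 + u.length) = (name.toList.drop (m + 1)).drop u.length
            by rw [List.drop_drop]]
        rw [huv]
        simp
    rw [he]
    have hne : ((m : Int)) ≠ -1 := by omega
    rw [if_neg hne, if_neg hne]
    simp only [Int.toNat_natCast]
    rw [pv_replace_eq, pv_repl_join, pvSpec]
    conv_rhs => rw [hsplit]
    rw [pvSplitDot_append_last hnd2]
    rw [List.dropLast_concat]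
    rw [List.getLastD_concat]
-- ===== VERDICT (by name: the statement is the Claim_ definition above) =====
theorem pytorch_tensor_name_to_icdl_tensor_name_spec : Claim_equal_pytorch_tensor_name_to_icdl_tensor_name := by
  intro name _
  unfold Spec_pytorch_tensor_name_to_icdl_tensor_name
  rw [pv_A_eq, pv_B_eq]
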